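-- pv_equiv track=rewrite | github.com/dumpstate/advent-of-code | 2020/day24.py | to_instruction
-- ===== SOURCE A (Python) =====
-- def to_instruction(line):
--     i = 0
--     instruction = []
--
--     while i < len(line):
--         if line[i:i + 2] in ("se", "sw", "ne", "nw"):
--             instruction.append(line[i:i + 2])
--             i += 2
--         else:
--             instruction.append(line[i])
--             i += 1
--
--     return instruction
-- ===== SOURCE B (Python) =====
-- import re
--
-- _TOKEN = re.compile(r'se|sw|ne|nw|[\s\S]')
--
-- def to_instruction(line):
--     # Regex tokenizer: the alternation tries the two-char directions first,
--     # then falls back to any single character ([\s\S] so newlines match too),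
--     # reproducing the greedy left-to-right scan.
--     return _TOKEN.findall(line)
-- ===== Notes on version B (the rewrite author's own statement) =====
-- stated objective: idiomatic
-- what changed: Replaces the manual index/slice while-loop with a precompiled regex tokenizer (re.findall with the alternation se|sw|ne|nw|[\s\S]) that hands the greedy scan to the regex engine, which runs in C instead of bytecode-level slicing and list appends.
import Mathlib
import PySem

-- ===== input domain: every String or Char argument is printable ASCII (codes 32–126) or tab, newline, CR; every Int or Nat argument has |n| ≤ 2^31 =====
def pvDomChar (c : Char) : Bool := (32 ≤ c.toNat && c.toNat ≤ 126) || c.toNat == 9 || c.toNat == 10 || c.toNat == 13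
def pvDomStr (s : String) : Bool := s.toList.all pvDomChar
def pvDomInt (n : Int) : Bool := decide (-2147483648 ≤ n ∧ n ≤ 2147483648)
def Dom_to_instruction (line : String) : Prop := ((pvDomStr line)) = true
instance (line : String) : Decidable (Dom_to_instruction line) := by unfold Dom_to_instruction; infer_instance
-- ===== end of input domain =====

-- B replaces A's manual index/slice while-loop by a regex tokenizer (re.findall of
-- 'se|sw|ne|nw|[\s\S]'); same cost, more idiomatic. The Lean port of B hand-ports that
-- regex's greedy left-to-right alternation scan exactly (no regex engine in Lean).

-- ===== PORT A =====
-- while i < len(line): check line[i:i+2] against the four directions, else take line[i]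
def to_instruction_loop (l : List Char) (i : Nat) (acc : List String) : List String :=
  if h : i < l.length then
    let t := PySem.List.slice l (some (i : Int)) (some ((i : Int) + 2))
    if t = ['s','e'] ∨ t = ['s','w'] ∨ t = ['n','e'] ∨ t = ['n','w'] then
      to_instruction_loop l (i + 2) (acc ++ [String.ofList t])
    else
      to_instruction_loop l (i + 1) (acc ++ [String.ofList [l[i]]])
  else acc
termination_by l.length - i

def to_instruction (line : String) : List String :=
  to_instruction_loop line.toList 0 []

-- ===== PORT B =====
-- hand-port of re.findall(r'se|sw|ne|nw|[\s\S]', line): at each position the regex engine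
-- tries the alternatives in order (the two-char directions, then any one character) and
-- resumes after the match; exact for this regex on every input.
def to_instruction_scan : List Char → List String
  | [] => []
  | [c] => [String.ofList [c]]
  | c :: d :: r =>
    if c = 's' ∧ d = 'e' then "se" :: to_instruction_scan r
    else if c = 's' ∧ d = 'w' then "sw" :: to_instruction_scan r
    else if c = 'n' ∧ d = 'e' then "ne" :: to_instruction_scan r
    else if c = 'n' ∧ d = 'w' then "nw" :: to_instruction_scan r
    else String.ofList [c] :: to_instruction_scan (d :: r)

def to_instruction_alt (line : String) : List String :=
  to_instruction_scan line.toList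

-- ===== PRECONDITION & SPEC =====
def Spec_to_instruction (line : String) (out : List String) : Prop := out = to_instruction_alt line
instance (line : String) (out : List String) : Decidable (Spec_to_instruction line out) := by unfold Spec_to_instruction; infer_instance

-- ===== CLAIM (what is proved, stated in full; the proofs are below) =====
def Claim_equal_to_instruction : Prop := ∀ (line : String), Dom_to_instruction line → Spec_to_instruction line (to_instruction line)

-- ===== LEMMAS AND PROOFS =====

lemma to_instruction_loop_eq_scan (n : Nat) :
    ∀ (l : List Char) (i : Nat) (acc : List String), l.length - i ≤ n →
      to_instruction_loop l i acc = acc ++ to_instruction_scan (l.drop i) := by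
  induction n with
  | zero =>
    intro l i acc hle
    have hge : l.length ≤ i := by omega
    rw [to_instruction_loop]
    simp [Nat.not_lt.mpr hge, List.drop_eq_nil_of_le hge, to_instruction_scan]
  | succ n ih =>
    intro l i acc hle
    rw [to_instruction_loop]
    by_cases h : i < l.length
    · simp only [h, dif_pos]
      have hslice : PySem.List.slice l (some (i : Int)) (some ((i : Int) + 2))
          = (l.drop i).take 2 := by
        have := PySem.List.slice_natCast_add (xs := l) (j := i) (n := 2)
        simpa using this
      have hdl : 0 < (l.drop i).length := by simp [h]
      obtain ⟨c, rest, hd⟩ : ∃ c rest, l.drop i = c :: rest := by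
        cases hcase : l.drop i with
        | nil => rw [hcase] at hdl; simp at hdl
        | cons a b => exact ⟨a, b, rfl⟩
      have hci : l[i] = c := by
        have : (l.drop i)[0]'(by omega) = l[i + 0]'(by omega) := List.getElem_drop ..
        simpa [hd] using this.symm
      have hd1 : l.drop (i + 1) = rest := by
        have : l.drop (i + 1) = (l.drop i).drop 1 := by
          rw [List.drop_drop]
        simp [this, hd]
      cases rest with
      | nil =>
        have h1 : l.length = i + 1 := by
          have := congrArg List.length hd
          simp at this; omega
        rw [hslice, hd]
        simp only [List.take]
        have hne : ¬([c] = ['s','e'] ∨ [c] = ['s','w'] ∨ [c] = ['n','e'] ∨ [c] = ['n','w']) := by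
          simp
        rw [if_neg hne]
        rw [ih l (i + 1) _ (by omega), hd1]
        simp [to_instruction_scan, hci]
      | cons d r =>
        have hd2 : l.drop (i + 2) = r := by
          have : l.drop (i + 2) = (l.drop i).drop 2 := by
            rw [List.drop_drop]
          simp [this, hd]
        rw [hslice, hd]
        simp only [List.take_succ_cons, List.take_zero]
        by_cases h4 : [c, d] = ['s','e'] ∨ [c, d] = ['s','w'] ∨ [c, d] = ['n','e'] ∨ [c, d] = ['n','w']
        · rw [if_pos h4, ih l (i + 2) _ (by omega), hd2]
          rcases h4 with h4 | h4 | h4 | h4 <;>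
            (injection h4 with h4a h4b; injection h4b with h4b _; subst h4a; subst h4b;
             simp [to_instruction_scan, List.append_assoc])
        · rw [if_neg h4, ih l (i + 1) _ (by omega), hd1]
          have hcd : ¬(c = 's' ∧ d = 'e') ∧ ¬(c = 's' ∧ d = 'w') ∧ ¬(c = 'n' ∧ d = 'e') ∧ ¬(c = 'n' ∧ d = 'w') := by
            constructor
            · rintro ⟨rfl, rfl⟩; exact h4 (Or.inl rfl)
            constructor
            · rintro ⟨rfl, rfl⟩; exact h4 (Or.inr (Or.inl rfl))
            constructor
            · rintro ⟨rfl, rfl⟩; exact h4 (Or.inr (Or.inr (Or.inl rfl)))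
            · rintro ⟨rfl, rfl⟩; exact h4 (Or.inr (Or.inr (Or.inr rfl)))
          simp [to_instruction_scan, hci, hcd.1, hcd.2.1, hcd.2.2.1, hcd.2.2.2]
    · simp only [h, dif_neg, not_false_iff]
      have hge : l.length ≤ i := by omega
      simp [List.drop_eq_nil_of_le hge, to_instruction_scan]

-- ===== VERDICT (by name: the statement is the Claim_ definition above) =====
theorem to_instruction_spec : Claim_equal_to_instruction := by
  intro line _
  unfold Spec_to_instruction to_instruction to_instruction_alt
  simpa using to_instruction_loop_eq_scan line.toList.length line.toList 0 [] (by omega)
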